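-- pv_equiv track=rewrite | github.com/NexaraAI/Nexara-agent | agent/react_loop.py | _think_status
-- ===== SOURCE A (Python) =====
-- def _think_status(step: int, goal: str) -> str:
--     """Generate a contextual thinking status based on the goal."""
--     g = goal.lower()
--
--     if any(w in g for w in ("search", "research", "find", "look up", "what is", "who is")):
--         return f"🔍 Researching... (step {step})"
--     if any(w in g for w in ("pdf", "docx", "document", "report", "file", "generate", "create")):
--         return f"📄 Preparing document... (step {step})"
--     if any(w in g for w in ("install", "apt", "package", "java", "node", "python")):
--         return f"📦 Planning installation... (step {step})"
--     if any(w in g for w in ("code", "script", "program", "function", "debug", "fix")):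
--         return f"⚙️ Writing code... (step {step})"
--     if any(w in g for w in ("schedule", "remind", "every", "daily", "timer")):
--         return f"📅 Setting up schedule... (step {step})"
--     if any(w in g for w in ("download", "fetch", "get file", "youtube", "video")):
--         return f"⬇️ Preparing download... (step {step})"
--     if any(w in g for w in ("translate", "translation")):
--         return f"🌐 Translating... (step {step})"
--     if any(w in g for w in ("weather", "temperature", "forecast")):
--         return f"🌤️ Checking weather... (step {step})"
--     if any(w in g for w in ("speed", "ping", "bandwidth", "internet")):
--         return f"🚀 Testing connection... (step {step})"
--     if any(w in g for w in ("disk", "storage", "space", "memory", "cpu", "system")):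
--         return f"🖥️ Checking system... (step {step})"
--     if any(w in g for w in ("send", "email", "discord", "slack", "message")):
--         return f"📧 Preparing message... (step {step})"
--     if any(w in g for w in ("image", "photo", "picture", "resize", "convert")):
--         return f"🖼️ Processing image... (step {step})"
--     if any(w in g for w in ("database", "sql", "query", "data")):
--         return f"🗄️ Querying data... (step {step})"
--     if any(w in g for w in ("git", "commit", "push", "pull", "branch")):
--         return f"🔧 Git operation... (step {step})"
--     if any(w in g for w in ("docker", "container", "image")):
--         return f"🐳 Docker operation... (step {step})"
--
--     return f"🧠 Analysing... (step {step})"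
-- ===== SOURCE B (Python) =====
-- # B: flat keyword->priority table; returns the label of the MINIMUM-priority
-- # matching keyword (min over one filtered pass) instead of A's grouped if-chain.
-- _LABELS = (
--     "🔍 Researching...",
--     "📄 Preparing document...",
--     "📦 Planning installation...",
--     "⚙️ Writing code...",
--     "📅 Setting up schedule...",
--     "⬇️ Preparing download...",
--     "🌐 Translating...",
--     "🌤️ Checking weather...",
--     "🚀 Testing connection...",
--     "🖥️ Checking system...",
--     "📧 Preparing message...",
--     "🖼️ Processing image...",
--     "🗄️ Querying data...",
--     "🔧 Git operation...",
--     "🐳 Docker operation...",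
--     "🧠 Analysing...",
-- )
--
-- _KEYWORDS = (
--     ("search", 0), ("research", 0), ("find", 0), ("look up", 0), ("what is", 0), ("who is", 0),
--     ("pdf", 1), ("docx", 1), ("document", 1), ("report", 1), ("file", 1), ("generate", 1), ("create", 1),
--     ("install", 2), ("apt", 2), ("package", 2), ("java", 2), ("node", 2), ("python", 2),
--     ("code", 3), ("script", 3), ("program", 3), ("function", 3), ("debug", 3), ("fix", 3),
--     ("schedule", 4), ("remind", 4), ("every", 4), ("daily", 4), ("timer", 4),
--     ("download", 5), ("fetch", 5), ("get file", 5), ("youtube", 5), ("video", 5),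
--     ("translate", 6), ("translation", 6),
--     ("weather", 7), ("temperature", 7), ("forecast", 7),
--     ("speed", 8), ("ping", 8), ("bandwidth", 8), ("internet", 8),
--     ("disk", 9), ("storage", 9), ("space", 9), ("memory", 9), ("cpu", 9), ("system", 9),
--     ("send", 10), ("email", 10), ("discord", 10), ("slack", 10), ("message", 10),
--     ("image", 11), ("photo", 11), ("picture", 11), ("resize", 11), ("convert", 11),
--     ("database", 12), ("sql", 12), ("query", 12), ("data", 12),
--     ("git", 13), ("commit", 13), ("push", 13), ("pull", 13), ("branch", 13),
--     ("docker", 14), ("container", 14), ("image", 14),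
-- )
--
--
-- def _think_status(step: int, goal: str) -> str:
--     g = goal.lower()
--     best = min((p for w, p in _KEYWORDS if w in g), default=len(_LABELS) - 1)
--     return f"{_LABELS[best]} (step {step})"
-- ===== Notes on version B (the rewrite author's own statement) =====
-- stated objective: alternative
-- what changed: Replaced the ordered 15-branch first-match if-chain over keyword groups by a flat keyword->priority table: one filtered pass collects the priorities of all matching keywords and the label of the minimum priority (default row otherwise) is returned.
import Mathlib
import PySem

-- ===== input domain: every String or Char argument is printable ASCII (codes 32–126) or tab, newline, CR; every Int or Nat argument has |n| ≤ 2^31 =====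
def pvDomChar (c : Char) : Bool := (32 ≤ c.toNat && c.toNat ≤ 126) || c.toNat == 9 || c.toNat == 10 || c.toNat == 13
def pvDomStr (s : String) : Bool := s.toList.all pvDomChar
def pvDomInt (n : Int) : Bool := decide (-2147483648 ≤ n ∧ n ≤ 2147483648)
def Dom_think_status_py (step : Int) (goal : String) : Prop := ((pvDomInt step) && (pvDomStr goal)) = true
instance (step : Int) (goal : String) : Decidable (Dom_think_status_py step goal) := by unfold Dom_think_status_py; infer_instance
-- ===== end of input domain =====

-- B replaces A's ordered 15-branch if-chain over keyword groups by a flat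
-- keyword->priority table: one filtered pass over all keywords, then the label
-- of the minimum matching priority (alternative algorithm; same return value).
-- ===== PORT A =====
def think_status_py (step : Int) (goal : String) : String :=
  let g := PySem.Str.lower goal
    if (["search", "research", "find", "look up", "what is", "who is"] : List String).any (fun w => PySem.Str.isIn w g) then "🔍 Researching... (step " ++ PySem.Int.toStr step ++ ")"
  else
  if (["pdf", "docx", "document", "report", "file", "generate", "create"] : List String).any (fun w => PySem.Str.isIn w g) then "📄 Preparing document... (step " ++ PySem.Int.toStr step ++ ")"
  else
  if (["install", "apt", "package", "java", "node", "python"] : List String).any (fun w => PySem.Str.isIn w g) then "📦 Planning installation... (step " ++ PySem.Int.toStr step ++ ")"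
  else
  if (["code", "script", "program", "function", "debug", "fix"] : List String).any (fun w => PySem.Str.isIn w g) then "⚙️ Writing code... (step " ++ PySem.Int.toStr step ++ ")"
  else
  if (["schedule", "remind", "every", "daily", "timer"] : List String).any (fun w => PySem.Str.isIn w g) then "📅 Setting up schedule... (step " ++ PySem.Int.toStr step ++ ")"
  else
  if (["download", "fetch", "get file", "youtube", "video"] : List String).any (fun w => PySem.Str.isIn w g) then "⬇️ Preparing download... (step " ++ PySem.Int.toStr step ++ ")"
  else
  if (["translate", "translation"] : List String).any (fun w => PySem.Str.isIn w g) then "🌐 Translating... (step " ++ PySem.Int.toStr step ++ ")"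
  else
  if (["weather", "temperature", "forecast"] : List String).any (fun w => PySem.Str.isIn w g) then "🌤️ Checking weather... (step " ++ PySem.Int.toStr step ++ ")"
  else
  if (["speed", "ping", "bandwidth", "internet"] : List String).any (fun w => PySem.Str.isIn w g) then "🚀 Testing connection... (step " ++ PySem.Int.toStr step ++ ")"
  else
  if (["disk", "storage", "space", "memory", "cpu", "system"] : List String).any (fun w => PySem.Str.isIn w g) then "🖥️ Checking system... (step " ++ PySem.Int.toStr step ++ ")"
  else
  if (["send", "email", "discord", "slack", "message"] : List String).any (fun w => PySem.Str.isIn w g) then "📧 Preparing message... (step " ++ PySem.Int.toStr step ++ ")"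
  else
  if (["image", "photo", "picture", "resize", "convert"] : List String).any (fun w => PySem.Str.isIn w g) then "🖼️ Processing image... (step " ++ PySem.Int.toStr step ++ ")"
  else
  if (["database", "sql", "query", "data"] : List String).any (fun w => PySem.Str.isIn w g) then "🗄️ Querying data... (step " ++ PySem.Int.toStr step ++ ")"
  else
  if (["git", "commit", "push", "pull", "branch"] : List String).any (fun w => PySem.Str.isIn w g) then "🔧 Git operation... (step " ++ PySem.Int.toStr step ++ ")"
  else
  if (["docker", "container", "image"] : List String).any (fun w => PySem.Str.isIn w g) then "🐳 Docker operation... (step " ++ PySem.Int.toStr step ++ ")"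
  else
  "🧠 Analysing... (step " ++ PySem.Int.toStr step ++ ")"

-- ===== PORT B =====
def pvLabels : List String :=
[
  "🔍 Researching...",
  "📄 Preparing document...",
  "📦 Planning installation...",
  "⚙️ Writing code...",
  "📅 Setting up schedule...",
  "⬇️ Preparing download...",
  "🌐 Translating...",
  "🌤️ Checking weather...",
  "🚀 Testing connection...",
  "🖥️ Checking system...",
  "📧 Preparing message...",
  "🖼️ Processing image...",
  "🗄️ Querying data...",
  "🔧 Git operation...",
  "🐳 Docker operation...",
  "🧠 Analysing..."
]

def pvKeywords : List (String × Int) :=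
[
  ("search", 0), ("research", 0), ("find", 0), ("look up", 0), ("what is", 0), ("who is", 0),
  ("pdf", 1), ("docx", 1), ("document", 1), ("report", 1), ("file", 1), ("generate", 1), ("create", 1),
  ("install", 2), ("apt", 2), ("package", 2), ("java", 2), ("node", 2), ("python", 2),
  ("code", 3), ("script", 3), ("program", 3), ("function", 3), ("debug", 3), ("fix", 3),
  ("schedule", 4), ("remind", 4), ("every", 4), ("daily", 4), ("timer", 4),
  ("download", 5), ("fetch", 5), ("get file", 5), ("youtube", 5), ("video", 5),
  ("translate", 6), ("translation", 6),
  ("weather", 7), ("temperature", 7), ("forecast", 7),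
  ("speed", 8), ("ping", 8), ("bandwidth", 8), ("internet", 8),
  ("disk", 9), ("storage", 9), ("space", 9), ("memory", 9), ("cpu", 9), ("system", 9),
  ("send", 10), ("email", 10), ("discord", 10), ("slack", 10), ("message", 10),
  ("image", 11), ("photo", 11), ("picture", 11), ("resize", 11), ("convert", 11),
  ("database", 12), ("sql", 12), ("query", 12), ("data", 12),
  ("git", 13), ("commit", 13), ("push", 13), ("pull", 13), ("branch", 13),
  ("docker", 14), ("container", 14), ("image", 14)
]

def think_status_py_alt (step : Int) (goal : String) : String :=
  let g := PySem.Str.lower goal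
  let best := (PySem.List.min? ((pvKeywords.filter (fun wp => PySem.Str.isIn wp.1 g)).map Prod.snd) (fun x => x)).getD ((pvLabels.length : Int) - 1)
  ((PySem.List.pyGet? pvLabels best).getD "") ++ " (step " ++ PySem.Int.toStr step ++ ")"

-- ===== PRECONDITION & SPEC =====
def Spec_think_status_py (step : Int) (goal : String) (out : String) : Prop := out = think_status_py_alt step goal
instance (step : Int) (goal : String) (out : String) : Decidable (Spec_think_status_py step goal out) := by unfold Spec_think_status_py; infer_instance

-- ===== CLAIM =====
def Claim_equal_think_status_py : Prop := ∀ (step : Int) (goal : String), Dom_think_status_py step goal → Spec_think_status_py step goal (think_status_py step goal)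

-- ===== LEMMAS AND PROOFS =====
-- A's keyword groups in branch order (proof-side view of the tables).
def pvGroups : List (List String) :=
[
  ["search", "research", "find", "look up", "what is", "who is"],
  ["pdf", "docx", "document", "report", "file", "generate", "create"],
  ["install", "apt", "package", "java", "node", "python"],
  ["code", "script", "program", "function", "debug", "fix"],
  ["schedule", "remind", "every", "daily", "timer"],
  ["download", "fetch", "get file", "youtube", "video"],
  ["translate", "translation"],
  ["weather", "temperature", "forecast"],
  ["speed", "ping", "bandwidth", "internet"],
  ["disk", "storage", "space", "memory", "cpu", "system"],
  ["send", "email", "discord", "slack", "message"],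
  ["image", "photo", "picture", "resize", "convert"],
  ["database", "sql", "query", "data"],
  ["git", "commit", "push", "pull", "branch"],
  ["docker", "container", "image"]
]

def pvFlatten : List (List String) → Int → List (String × Int)
  | [], _ => []
  | ws :: gs, k => ws.map (fun w => (w, k)) ++ pvFlatten gs (k + 1)

def pvFirst (g : String) : List (List String) → Int → Option Int
  | [], _ => none
  | ws :: gs, k => if ws.any (fun w => PySem.Str.isIn w g) then some k else pvFirst g gs (k + 1)

lemma pvFlatten_snd_ge : ∀ (gs : List (List String)) (k : Int) (wp : String × Int), wp ∈ pvFlatten gs k → k ≤ wp.2 := by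
  intro gs
  induction gs with
  | nil => intro k wp h; simp [pvFlatten] at h
  | cons ws gs ih =>
    intro k wp h
    rcases List.mem_append.mp h with h1 | h2
    · obtain ⟨w, _, rfl⟩ := List.mem_map.mp h1; simp
    · have := ih (k + 1) wp h2; omega

lemma pvFoldlMin (t : List Int) : ∀ (k : Int), (∀ y ∈ t, k ≤ y) → t.foldl min k = k := by
  induction t with
  | nil => intro k _; rfl
  | cons y t ih =>
    intro k h
    have hk : min k y = k := min_eq_left (h y (by simp))
    simp only [List.foldl_cons, hk]
    exact ih k (fun z hz => h z (by simp [hz]))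

lemma pvMin_eq (g : String) : ∀ (gs : List (List String)) (k : Int),
    PySem.List.min? (((pvFlatten gs k).filter (fun wp => PySem.Str.isIn wp.1 g)).map Prod.snd) (fun x => x) = pvFirst g gs k := by
  intro gs
  induction gs with
  | nil => intro k; simp [pvFlatten, pvFirst, PySem.List.min?_eq_none_iff]
  | cons ws gs ih =>
    intro k
    simp only [pvFlatten, pvFirst, List.filter_append, List.map_append, List.filter_map]
    cases h : ws.any (fun w => PySem.Str.isIn w g) with
    | false =>
      have hnil : ws.filter (fun w => PySem.Str.isIn w g) = [] := by
        rw [List.filter_eq_nil_iff]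
        intro w hw
        simpa using List.any_eq_false.mp h w hw
      simp only [Function.comp_def, hnil, List.map_nil, List.nil_append]
      exact ih (k + 1)
    | true =>
      obtain ⟨w0, hw0, hin⟩ := List.any_eq_true.mp h
      have hne : ws.filter (fun w => PySem.Str.isIn w g) ≠ [] := by
        intro hnil
        have h2 := List.filter_eq_nil_iff.mp hnil w0 hw0
        simp at h2
        simp [h2] at hin
      cases hcs : ws.filter (fun w => PySem.Str.isIn w g) with
      | nil => exact absurd hcs hne
      | cons c cs =>
        simp only [Function.comp_def, hcs, List.map_cons, List.map_map, List.cons_append,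
          PySem.List.min?_id_cons]
        rw [pvFoldlMin]
        · rfl
        · intro y hy
          rcases List.mem_append.mp hy with h1 | h2
          · obtain ⟨_, _, rfl⟩ := List.mem_map.mp h1; simp
          · obtain ⟨wp, hwp, rfl⟩ := List.mem_map.mp h2
            have := pvFlatten_snd_ge gs (k + 1) wp (List.mem_filter.mp hwp).1
            omega

lemma pvKeywords_eq : pvKeywords = pvFlatten pvGroups 0 := by rfl

-- ===== VERDICT =====
theorem think_status_py_spec : Claim_equal_think_status_py := by
  intro step goal _
  unfold Spec_think_status_py
  unfold think_status_py think_status_py_alt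
  simp only [pvKeywords_eq, pvMin_eq]
  cases h0 : (["search", "research", "find", "look up", "what is", "who is"] : List String).any (fun w => PySem.Str.isIn w (PySem.Str.lower goal)) with
  | true =>
    simp only [pvFirst, pvGroups, h0]
    rfl
  | false =>
    cases h1 : (["pdf", "docx", "document", "report", "file", "generate", "create"] : List String).any (fun w => PySem.Str.isIn w (PySem.Str.lower goal)) with
    | true =>
      simp only [pvFirst, pvGroups, h0, h1]
      rfl
    | false =>
      cases h2 : (["install", "apt", "package", "java", "node", "python"] : List String).any (fun w => PySem.Str.isIn w (PySem.Str.lower goal)) with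
      | true =>
        simp only [pvFirst, pvGroups, h0, h1, h2]
        rfl
      | false =>
        cases h3 : (["code", "script", "program", "function", "debug", "fix"] : List String).any (fun w => PySem.Str.isIn w (PySem.Str.lower goal)) with
        | true =>
          simp only [pvFirst, pvGroups, h0, h1, h2, h3]
          rfl
        | false =>
          cases h4 : (["schedule", "remind", "every", "daily", "timer"] : List String).any (fun w => PySem.Str.isIn w (PySem.Str.lower goal)) with
          | true =>
            simp only [pvFirst, pvGroups, h0, h1, h2, h3, h4]
            rfl
          | false =>
            cases h5 : (["download", "fetch", "get file", "youtube", "video"] : List String).any (fun w => PySem.Str.isIn w (PySem.Str.lower goal)) with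
            | true =>
              simp only [pvFirst, pvGroups, h0, h1, h2, h3, h4, h5]
              rfl
            | false =>
              cases h6 : (["translate", "translation"] : List String).any (fun w => PySem.Str.isIn w (PySem.Str.lower goal)) with
              | true =>
                simp only [pvFirst, pvGroups, h0, h1, h2, h3, h4, h5, h6]
                rfl
              | false =>
                cases h7 : (["weather", "temperature", "forecast"] : List String).any (fun w => PySem.Str.isIn w (PySem.Str.lower goal)) with
                | true =>
                  simp only [pvFirst, pvGroups, h0, h1, h2, h3, h4, h5, h6, h7]
                  rfl
                | false =>
                  cases h8 : (["speed", "ping", "bandwidth", "internet"] : List String).any (fun w => PySem.Str.isIn w (PySem.Str.lower goal)) with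
                  | true =>
                    simp only [pvFirst, pvGroups, h0, h1, h2, h3, h4, h5, h6, h7, h8]
                    rfl
                  | false =>
                    cases h9 : (["disk", "storage", "space", "memory", "cpu", "system"] : List String).any (fun w => PySem.Str.isIn w (PySem.Str.lower goal)) with
                    | true =>
                      simp only [pvFirst, pvGroups, h0, h1, h2, h3, h4, h5, h6, h7, h8, h9]
                      rfl
                    | false =>
                      cases h10 : (["send", "email", "discord", "slack", "message"] : List String).any (fun w => PySem.Str.isIn w (PySem.Str.lower goal)) with
                      | true =>
                        simp only [pvFirst, pvGroups, h0, h1, h2, h3, h4, h5, h6, h7, h8, h9, h10]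
                        rfl
                      | false =>
                        cases h11 : (["image", "photo", "picture", "resize", "convert"] : List String).any (fun w => PySem.Str.isIn w (PySem.Str.lower goal)) with
                        | true =>
                          simp only [pvFirst, pvGroups, h0, h1, h2, h3, h4, h5, h6, h7, h8, h9, h10, h11]
                          rfl
                        | false =>
                          cases h12 : (["database", "sql", "query", "data"] : List String).any (fun w => PySem.Str.isIn w (PySem.Str.lower goal)) with
                          | true =>
                            simp only [pvFirst, pvGroups, h0, h1, h2, h3, h4, h5, h6, h7, h8, h9, h10, h11, h12]
                            rfl
                          | false =>
                            cases h13 : (["git", "commit", "push", "pull", "branch"] : List String).any (fun w => PySem.Str.isIn w (PySem.Str.lower goal)) with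
                            | true =>
                              simp only [pvFirst, pvGroups, h0, h1, h2, h3, h4, h5, h6, h7, h8, h9, h10, h11, h12, h13]
                              rfl
                            | false =>
                              cases h14 : (["docker", "container", "image"] : List String).any (fun w => PySem.Str.isIn w (PySem.Str.lower goal)) with
                              | true =>
                                simp only [pvFirst, pvGroups, h0, h1, h2, h3, h4, h5, h6, h7, h8, h9, h10, h11, h12, h13, h14]
                                rfl
                              | false =>
                                simp only [pvFirst, pvGroups, h0, h1, h2, h3, h4, h5, h6, h7, h8, h9, h10, h11, h12, h13, h14]
                                rfl
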